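-- pv_equiv track=rewrite | github.com/valentingol/docstripy | npdocify/parse_doc/parse_def.py | parse_return
-- ===== SOURCE A (Python) =====
-- from typing import List
--
-- def parse_return(line: str) -> List[str]:
--     """Parse return type."""
--     line = line.strip()
--     if not line.startswith("Tuple["):
--         return [line]
--     line = line = line[6:]
--     rtype_str = line.rsplit("]", maxsplit=1)[0]
--     rtype = []
--     brack = 0
--     current_type = ""
--     for char in rtype_str:
--         if char == "[":
--             brack += 1
--         elif char == "]":
--             brack -= 1
--         if char == "," and brack == 0:
--             rtype.append(current_type.strip())
--             current_type = ""
--         else: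
--             current_type += char
--     if current_type.strip():
--         rtype.append(current_type.strip())
--     return rtype
-- ===== SOURCE B (Python) =====
-- from typing import List
--
-- def parse_return(line: str) -> List[str]:
--     """Parse return type."""
--     line = line.strip()
--     if not line.startswith("Tuple["):
--         return [line]
--     s = line[6:].rsplit("]", maxsplit=1)[0]
--     segs = []
--     while True:
--         depth = 0
--         cut = -1
--         for i, ch in enumerate(s):
--             if ch == "[":
--                 depth += 1
--             elif ch == "]":
--                 depth -= 1
--             elif ch == "," and depth == 0:
--                 cut = i
--                 break
--         if cut == -1:
--             tail = s.strip()
--             if tail: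
--                 segs.append(tail)
--             return segs
--         segs.append(s[:cut].strip())
--         s = s[cut + 1:]
-- ===== Notes on version B (the rewrite author's own statement) =====
-- stated objective: alternative
-- what changed: A makes one fold over the characters accumulating the current segment char by char in loop state; B repeatedly scans for the next top-level comma and slices the segment out of the string, so no per-character accumulator string is maintained.
import Mathlib
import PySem

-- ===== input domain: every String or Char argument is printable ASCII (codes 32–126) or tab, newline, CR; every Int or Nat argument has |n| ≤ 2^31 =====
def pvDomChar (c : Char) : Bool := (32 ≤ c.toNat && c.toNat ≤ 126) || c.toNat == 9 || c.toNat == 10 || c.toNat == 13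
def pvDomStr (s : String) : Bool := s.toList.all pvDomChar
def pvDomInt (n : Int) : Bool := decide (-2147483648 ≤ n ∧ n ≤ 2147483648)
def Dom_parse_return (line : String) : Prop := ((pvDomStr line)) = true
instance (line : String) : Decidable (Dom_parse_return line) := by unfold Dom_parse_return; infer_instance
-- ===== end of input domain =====

-- B rescans from each split point for the next top-level comma and slices the segment out,
-- instead of A's single fold that accumulates the current segment character by character;
-- objective: alternative decomposition, same asymptotic cost.

-- shared preamble helper: s.rsplit("]", maxsplit=1)[0], i.e. everything before the LAST ']'
-- (the whole string if there is none); exact hand port of that rsplit use.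
def pvRsplitHead (cs : List Char) : List Char :=
  if ']' ∈ cs then cs.take (cs.length - 1 - cs.reverse.idxOf ']') else cs

-- ===== PORT A =====
-- one step of A's for-loop: state = (rtype, brack, current_type)
def pvStepA (st : List (List Char) × Int × List Char) (c : Char) :
    List (List Char) × Int × List Char :=
  let (acc, b, cur) := st
  let b' : Int := if c = '[' then b + 1 else if c = ']' then b - 1 else b
  if c = ',' ∧ b' = 0 then (acc ++ [PySem.Chars.strip cur], b', [])
  else (acc, b', cur ++ [c])

-- A's trailing 'if current_type.strip(): rtype.append(...)'
def pvFinalA (st : List (List Char) × Int × List Char) : List (List Char) :=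
  if PySem.Chars.strip st.2.2 ≠ [] then st.1 ++ [PySem.Chars.strip st.2.2] else st.1

def parse_return (line : String) : List String :=
  let l := PySem.Chars.strip line.toList
  if ¬ (PySem.Chars.startswith l "Tuple[".toList = true) then [String.ofList l]
  else
    let rtype_str := pvRsplitHead (l.drop 6)
    (pvFinalA (rtype_str.foldl pvStepA ([], 0, []))).map String.ofList

-- ===== PORT B =====
-- B's inner for-loop: index of the first top-level comma (cut = -1 ↦ none)
def pvFindCut (depth : Int) (cs : List Char) : Option Nat :=
  match cs with
  | [] => none
  | c :: rest =>
    if c = '[' then pvFindCut (depth + 1) rest |>.map (· + 1)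
    else if c = ']' then pvFindCut (depth - 1) rest |>.map (· + 1)
    else if c = ',' ∧ depth = 0 then some 0
    else pvFindCut depth rest |>.map (· + 1)

theorem pvFindCut_lt (depth : Int) (cs : List Char) (i : Nat) :
    pvFindCut depth cs = some i → i < cs.length := by
  induction cs generalizing depth i with
  | nil => simp [pvFindCut]
  | cons c rest ih =>
    intro h
    simp only [pvFindCut] at h
    split_ifs at h <;> first
      | (simp only [Option.map_eq_some_iff] at h
         obtain ⟨j, hj, rfl⟩ := h
         have := ih _ _ hj
         simp; omega)
      | (simp_all; omega)

-- B's while-loop, segments accumulated in order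
def pvSegLoop (segs : List (List Char)) (s : List Char) : List (List Char) :=
  match h : pvFindCut 0 s with
  | none =>
    let tail := PySem.Chars.strip s
    if tail ≠ [] then segs ++ [tail] else segs
  | some cut => pvSegLoop (segs ++ [PySem.Chars.strip (s.take cut)]) (s.drop (cut + 1))
termination_by s.length
decreasing_by
  have := pvFindCut_lt 0 s cut h
  simp
  omega

def parse_return_alt (line : String) : List String :=
  let l := PySem.Chars.strip line.toList
  if ¬ (PySem.Chars.startswith l "Tuple[".toList = true) then [String.ofList l]
  else
    let rtype_str := pvRsplitHead (l.drop 6)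
    (pvSegLoop [] rtype_str).map String.ofList

-- ===== PRECONDITION & SPEC =====
def Spec_parse_return (line : String) (out : List String) : Prop := out = parse_return_alt line
instance (line : String) (out : List String) : Decidable (Spec_parse_return line out) := by unfold Spec_parse_return; infer_instance

-- ===== CLAIM (what is proved, stated in full; the proofs are below) =====
def Claim_equal_parse_return : Prop := ∀ (line : String), Dom_parse_return line → Spec_parse_return line (parse_return line)

-- ===== LEMMAS AND PROOFS =====

-- A's accumulator splits off: the already-collected segments are a prefix
theorem finalA_foldl_acc (cs : List Char) (acc : List (List Char)) (b : Int) (cur : List Char) :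
    pvFinalA (cs.foldl pvStepA (acc, b, cur)) = acc ++ pvFinalA (cs.foldl pvStepA ([], b, cur)) := by
  induction cs generalizing acc b cur with
  | nil => unfold pvFinalA; simp; split <;> simp
  | cons c rest ih =>
    simp only [List.foldl_cons, pvStepA]
    split_ifs with h1 h2 h3 h4 <;>
      first
        | (rw [ih, ih ([] ++ [PySem.Chars.strip cur])]; simp)
        | rw [ih]

-- B's accumulator splits off likewise
theorem segLoop_acc (s : List Char) (segs : List (List Char)) :
    pvSegLoop segs s = segs ++ pvSegLoop [] s := by
  induction hn : s.length using Nat.strong_induction_on generalizing s segs with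
  | _ n ih =>
    rw [pvSegLoop, pvSegLoop]
    cases h : pvFindCut 0 s with
    | none => by_cases hs : PySem.Chars.strip s = [] <;> simp [hs]
    | some cut =>
      have hlt := pvFindCut_lt 0 s cut h
      subst hn
      simp only [h]
      rw [ih (s.drop (cut + 1)).length (by simp; omega) _ _ rfl,
          ih (s.drop (cut + 1)).length (by simp; omega) _ ([] ++ [PySem.Chars.strip (s.take cut)]) rfl]
      simp

-- the key correspondence: A's fold from mid-state (b, cur) versus the first cut of pvFindCut
theorem foldA_findCut (cs : List Char) (b : Int) (cur : List Char) :
    pvFinalA (cs.foldl pvStepA ([], b, cur)) =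
      match pvFindCut b cs with
      | none =>
          if PySem.Chars.strip (cur ++ cs) ≠ [] then [PySem.Chars.strip (cur ++ cs)] else []
      | some i =>
          PySem.Chars.strip (cur ++ cs.take i) ::
            pvFinalA ((cs.drop (i + 1)).foldl pvStepA ([], 0, [])) := by
  induction cs generalizing b cur with
  | nil => simp [pvFindCut, pvFinalA]
  | cons c rest ih =>
    simp only [List.foldl_cons, pvStepA, pvFindCut]
    by_cases hbr : c = '['
    · subst hbr
      simp only [reduceIte]
      rw [finalA_foldl_acc, ih]
      cases h : pvFindCut (b + 1) rest <;> simp_all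
    · by_cases hbr2 : c = ']'
      · subst hbr2
        simp only [reduceIte]
        rw [finalA_foldl_acc, ih]
        cases h : pvFindCut (b - 1) rest <;> simp_all
      · by_cases hc : c = ',' ∧ b = 0
        · obtain ⟨rfl, rfl⟩ := hc
          simp only [if_pos (And.intro rfl rfl)]
          rw [finalA_foldl_acc]
          simp
        · simp only [if_neg hbr, if_neg hbr2, if_neg hc]
          rw [finalA_foldl_acc, ih]
          cases h : pvFindCut b rest <;> simp_all
  
-- main: A's fold equals B's loop
theorem foldA_eq_segLoop (cs : List Char) :
    pvFinalA (cs.foldl pvStepA ([], 0, [])) = pvSegLoop [] cs := by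
  induction hn : cs.length using Nat.strong_induction_on generalizing cs with
  | _ n ih =>
    rw [foldA_findCut, pvSegLoop]
    cases h : pvFindCut 0 cs with
    | none => simp [h]
    | some cut =>
      have hlt := pvFindCut_lt 0 cs cut h
      subst hn
      simp only [h]
      rw [segLoop_acc, ← ih (cs.drop (cut + 1)).length (by simp; omega) _ rfl]
      simp

-- ===== VERDICT (by name: the statement is the Claim_ definition above) =====
theorem parse_return_spec : Claim_equal_parse_return := by
  intro line _
  unfold Spec_parse_return parse_return parse_return_alt
  simp only []
  split
  · rfl
  · rw [foldA_eq_segLoop]
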